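-- pv_equiv track=rewrite | github.com/EternityForest/KaithemAutomation | kaithem/src/modules.py | getInitialWhitespace
-- ===== SOURCE A (Python) =====
-- def getInitialWhitespace(s):
--     t = ''
--     for i in s:
--         if i in '\t ':
--             t += i
--         else:
--             break
--     return t
-- ===== SOURCE B (Python) =====
-- def getInitialWhitespace(s):
--     n = len(s) - len(s.lstrip('\t '))
--     return s[:n]
-- ===== Notes on version B (the rewrite author's own statement) =====
-- stated objective: simpler
-- what changed: Replaces the char-by-char accumulation loop (with break) by computing the boundary index from lstrip and returning one slice.
import Mathlib
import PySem

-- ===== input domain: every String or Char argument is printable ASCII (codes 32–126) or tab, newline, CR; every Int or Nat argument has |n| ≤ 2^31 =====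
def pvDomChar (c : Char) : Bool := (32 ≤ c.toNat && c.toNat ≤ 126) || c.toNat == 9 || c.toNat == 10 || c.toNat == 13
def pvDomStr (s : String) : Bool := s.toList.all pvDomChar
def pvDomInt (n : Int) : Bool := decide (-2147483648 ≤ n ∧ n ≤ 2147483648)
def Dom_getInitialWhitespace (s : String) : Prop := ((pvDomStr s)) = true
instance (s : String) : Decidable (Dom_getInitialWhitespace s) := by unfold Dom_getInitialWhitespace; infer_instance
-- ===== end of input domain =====

-- B computes the boundary index via lstrip and takes one slice instead of accumulating characters in a loop (objective: simpler).

-- ===== PORT A =====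
-- the for-loop with break: accumulate while the char is in '\t ', stop at the first other char
def pvLoopA : List Char → List Char
  | [] => []
  | c :: rest => if ['\t', ' '].contains c then c :: pvLoopA rest else []

def getInitialWhitespace (s : String) : String := String.ofList (pvLoopA s.toList)

-- ===== PORT B =====
-- n = len(s) - len(s.lstrip('\t ')); return s[:n]
def getInitialWhitespace_alt (s : String) : String :=
  let l := s.toList
  let n : Int := (l.length : Int) - ((l.dropWhile (fun c => ['\t', ' '].contains c)).length : Int)
  String.ofList (PySem.List.slice l none (some n))

-- ===== PRECONDITION & SPEC =====
def Spec_getInitialWhitespace (s : String) (out : String) : Prop := out = getInitialWhitespace_alt s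
instance (s : String) (out : String) : Decidable (Spec_getInitialWhitespace s out) := by unfold Spec_getInitialWhitespace; infer_instance

-- ===== CLAIM (what is proved, stated in full; the proofs are below) =====
def Claim_equal_getInitialWhitespace : Prop := ∀ (s : String), Dom_getInitialWhitespace s → Spec_getInitialWhitespace s (getInitialWhitespace s)

-- ===== LEMMAS AND PROOFS =====
lemma takeWhile_eq_take_sub (p : Char → Bool) (l : List Char) :
    l.takeWhile p = l.take (l.length - (l.dropWhile p).length) := by
  induction l with
  | nil => simp
  | cons c t ih =>
    by_cases h : p c
    · have hle : (t.dropWhile p).length ≤ t.length := List.length_dropWhile_le p t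
      rw [List.takeWhile_cons, List.dropWhile_cons, if_pos h, if_pos h, List.length_cons,
        show t.length + 1 - (t.dropWhile p).length = (t.length - (t.dropWhile p).length) + 1
          from by omega, List.take_succ_cons, ih]
    · rw [List.takeWhile_cons, List.dropWhile_cons, if_neg h, if_neg h]
      simp

lemma pvLoopA_eq_takeWhile (l : List Char) :
    pvLoopA l = l.takeWhile (fun c => ['\t', ' '].contains c) := by
  induction l with
  | nil => rfl
  | cons c t ih =>
    by_cases h : c = '\t' ∨ c = ' '
    · rcases h with h | h <;> subst h <;> simp [pvLoopA, ih]
    · push Not at h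
      simp [pvLoopA, h.1, h.2]

-- ===== VERDICT (by name: the statement is the Claim_ definition above) =====
theorem getInitialWhitespace_spec : Claim_equal_getInitialWhitespace := by
  intro s _
  unfold Spec_getInitialWhitespace getInitialWhitespace getInitialWhitespace_alt
  have hle : (s.toList.dropWhile (fun c => ['\t', ' '].contains c)).length ≤ s.toList.length :=
    List.length_dropWhile_le _ _
  have hcast : ((s.toList.length : Int) - ((s.toList.dropWhile (fun c => ['\t', ' '].contains c)).length : Int))
      = ((s.toList.length - (s.toList.dropWhile (fun c => ['\t', ' '].contains c)).length : Nat) : Int) := by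
    omega
  simp only [hcast, PySem.List.slice_to_natCast, pvLoopA_eq_takeWhile,
    takeWhile_eq_take_sub]
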